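-- pv_equiv track=rewrite | github.com/linhdvu14/cp-sols | sols/Google/KickStart/2020/2020_D/B_Alien_Piano.py | solve
-- ===== SOURCE A (Python) =====
-- def solve(nums):
-- 	cur = [0]*4  # min breaks if nums[i]==k
-- 	for i in range(1,len(nums)):
-- 		nxt = [float('inf')]*4
-- 		diff = nums[i]-nums[i-1]
-- 		for k in range(4):
-- 			for kk in range(4):
-- 				add = 0 if (diff==0 and k==kk) or (diff>0 and k>kk) or (diff<0 and k<kk) else 1
-- 				nxt[k] = min(nxt[k], add+cur[kk])
-- 		cur = nxt
-- 	return min(cur)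
-- ===== SOURCE B (Python) =====
-- def solve(nums):
--     ans = 0
--     d = 0    # direction of current monotone run: 1 up, -1 down, 0 none yet
--     run = 0  # strict steps used in the current 4-key segment of the run
--     for i in range(1, len(nums)):
--         if nums[i] > nums[i-1]:
--             s = 1
--         elif nums[i] < nums[i-1]:
--             s = -1
--         else:
--             continue
--         run = run + 1 if s == d else 1
--         d = s
--         if run == 4:  # a 5th note of a monotone run does not fit on 4 keys
--             ans += 1
--             run = 0   # the break restarts a fresh 4-note segment
--     return ans
-- ===== Notes on version B (the rewrite author's own statement) =====
-- stated objective: faster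
-- what changed: Replaced the 4-wide DP vector with its 16 min-comparisons per note by a greedy single-counter scan that only tracks the current monotone run's direction and length, breaking whenever a run needs a fifth key.
import Mathlib
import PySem

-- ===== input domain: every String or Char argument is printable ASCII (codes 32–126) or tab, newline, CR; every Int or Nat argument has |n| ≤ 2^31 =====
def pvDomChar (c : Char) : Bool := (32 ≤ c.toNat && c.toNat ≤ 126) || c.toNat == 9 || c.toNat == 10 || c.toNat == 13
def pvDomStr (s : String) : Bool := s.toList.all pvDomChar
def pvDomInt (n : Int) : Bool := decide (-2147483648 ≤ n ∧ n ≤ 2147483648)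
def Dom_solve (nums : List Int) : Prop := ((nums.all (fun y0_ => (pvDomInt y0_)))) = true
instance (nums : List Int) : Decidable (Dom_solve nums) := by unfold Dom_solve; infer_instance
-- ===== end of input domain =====

-- B replaces A's 4-wide DP (16 min-comparisons per note) by a greedy O(1)-state scan
-- counting monotone-run overflows; equivalence is proved via an exact DP-vector invariant.


-- ===== PORT A =====
-- 'add' of the inner kk-loop, branch for branch
def addA (diff k kk : Int) : Int :=
  if (diff = 0 ∧ k = kk) ∨ (diff > 0 ∧ k > kk) ∨ (diff < 0 ∧ k < kk) then 0 else 1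

-- nxt[k]: the kk-loop 'nxt[k] = min(nxt[k], add+cur[kk])' for kk = 0,1,2,3, starting
-- from float('inf'); Python's min(inf, x) = x, so the chain starts at the kk = 0 term.
def rowA (diff k c0 c1 c2 c3 : Int) : Int :=
  min (min (min (addA diff k 0 + c0) (addA diff k 1 + c1)) (addA diff k 2 + c2))
    (addA diff k 3 + c3)

-- one iteration of the outer i-loop: the k-loop over the 4 entries of nxt
def stepA (diff : Int) (c : Int × Int × Int × Int) : Int × Int × Int × Int :=
  (rowA diff 0 c.1 c.2.1 c.2.2.1 c.2.2.2, rowA diff 1 c.1 c.2.1 c.2.2.1 c.2.2.2,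
   rowA diff 2 c.1 c.2.1 c.2.2.1 c.2.2.2, rowA diff 3 c.1 c.2.1 c.2.2.1 c.2.2.2)

-- 'for i in range(1, len(nums))' carrying nums[i-1] as prev
def loopA : List Int → Int → Int × Int × Int × Int → Int × Int × Int × Int
  | [], _, c => c
  | x :: xs, prev, c => loopA xs x (stepA (x - prev) c)

-- min(cur) on the 4-element list cur
def min4 (c : Int × Int × Int × Int) : Int := min (min (min c.1 c.2.1) c.2.2.1) c.2.2.2

def solve (nums : List Int) : Int :=
  match nums with
  | [] => min4 (0, 0, 0, 0)
  | h :: t => min4 (loopA t h (0, 0, 0, 0))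

-- ===== PORT B =====
-- greedy scan: ans, direction d, steps 'run' of the current segment
def loopB : List Int → Int → Int → Int → Int → Int
  | [], _, ans, _, _ => ans
  | x :: xs, prev, ans, d, run =>
    if x > prev then
      let run' := if (1 : Int) = d then run + 1 else 1
      if run' = 4 then loopB xs x (ans + 1) 1 0 else loopB xs x ans 1 run'
    else if x < prev then
      let run' := if (-1 : Int) = d then run + 1 else 1
      if run' = 4 then loopB xs x (ans + 1) (-1) 0 else loopB xs x ans (-1) run'
    else loopB xs x ans d run

def solve_alt (nums : List Int) : Int :=
  match nums with
  | [] => 0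
  | h :: t => loopB t h 0 0 0

-- ===== PRECONDITION & SPEC =====
def Spec_solve (nums : List Int) (out : Int) : Prop := out = solve_alt nums
instance (nums : List Int) (out : Int) : Decidable (Spec_solve nums out) := by unfold Spec_solve; infer_instance

-- ===== CLAIM (what is proved, stated in full; the proofs are below) =====
def Claim_equal_solve : Prop := ∀ (nums : List Int), Dom_solve nums → Spec_solve nums (solve nums)

-- ===== LEMMAS AND PROOFS =====

set_option maxHeartbeats 1000000

-- the DP vector A maintains, relative to B's counter: ans + vecOf d run
def vecOf (d run : Int) : Int × Int × Int × Int :=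
  if run = 0 then (0, 0, 0, 0)
  else if d = 1 then
    (if run = 1 then (1, 0, 0, 0) else if run = 2 then (1, 1, 0, 0) else (1, 1, 1, 0))
  else
    (if run = 1 then (0, 0, 0, 1) else if run = 2 then (0, 0, 1, 1) else (0, 1, 1, 1))

def shiftv (a : Int) (c : Int × Int × Int × Int) : Int × Int × Int × Int :=
  (a + c.1, a + c.2.1, a + c.2.2.1, a + c.2.2.2)

-- the states B's scan can be in
def ValidSt (d run : Int) : Prop :=
  (run = 0 ∧ (d = 0 ∨ d = 1 ∨ d = -1)) ∨ ((d = 1 ∨ d = -1) ∧ (run = 1 ∨ run = 2 ∨ run = 3))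

lemma step_eq (a d run : Int) (hv : ValidSt d run) :
    stepA 0 (shiftv a (vecOf d run)) = shiftv a (vecOf d run) := by
  rcases hv with ⟨hr, hd | hd | hd⟩ | ⟨hd | hd, hr | hr | hr⟩ <;> subst hr <;> subst hd <;>
    simp [stepA, rowA, addA, shiftv, vecOf] <;> omega

lemma step_up (diff a d run : Int) (hv : ValidSt d run) (h : 0 < diff) :
    stepA diff (shiftv a (vecOf d run)) =
      if d = 1 ∧ run = 3 then shiftv (a + 1) (vecOf 1 0)
      else shiftv a (vecOf 1 (if d = 1 then run + 1 else 1)) := by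
  rcases hv with ⟨hr, hd | hd | hd⟩ | ⟨hd | hd, hr | hr | hr⟩ <;> subst hr <;> subst hd <;>
    simp [stepA, rowA, addA, shiftv, vecOf] <;> (try split_ifs) <;> omega

lemma step_down (diff a d run : Int) (hv : ValidSt d run) (h : diff < 0) :
    stepA diff (shiftv a (vecOf d run)) =
      if d = -1 ∧ run = 3 then shiftv (a + 1) (vecOf (-1) 0)
      else shiftv a (vecOf (-1) (if d = -1 then run + 1 else 1)) := by
  rcases hv with ⟨hr, hd | hd | hd⟩ | ⟨hd | hd, hr | hr | hr⟩ <;> subst hr <;> subst hd <;>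
    simp [stepA, rowA, addA, shiftv, vecOf] <;> (try split_ifs) <;> omega

lemma loop_key : ∀ (xs : List Int) (prev ans d run : Int), ValidSt d run →
    min4 (loopA xs prev (shiftv ans (vecOf d run))) = loopB xs prev ans d run := by
  intro xs
  induction xs with
  | nil =>
    intro prev ans d run hv
    rcases hv with ⟨hr, hd | hd | hd⟩ | ⟨hd | hd, hr | hr | hr⟩ <;> subst hr <;> subst hd <;>
      simp [loopA, loopB, min4, shiftv, vecOf]
  | cons x xs ih =>
    intro prev ans d run hv
    have hb : 0 ≤ run ∧ run ≤ 3 := by unfold ValidSt at hv; omega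
    have hA : loopA (x :: xs) prev (shiftv ans (vecOf d run)) =
        loopA xs x (stepA (x - prev) (shiftv ans (vecOf d run))) := rfl
    rcases lt_trichotomy prev x with h | h | h
    · -- nums[i] > nums[i-1]
      have hB : loopB (x :: xs) prev ans d run =
          (if (if (1 : Int) = d then run + 1 else 1) = 4 then loopB xs x (ans + 1) 1 0
           else loopB xs x ans 1 (if (1 : Int) = d then run + 1 else 1)) := by
        simp only [loopB, if_pos h]
      rw [hA, hB, step_up (x - prev) ans d run hv (by omega)]
      split_ifs <;>
        first
          | omega
          | exact ih x _ _ _ (by unfold ValidSt at hv ⊢; omega)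
    · -- equal notes: both sides keep their state
      subst h
      rw [hA, show prev - prev = (0 : Int) from by omega, step_eq ans d run hv,
        show loopB (prev :: xs) prev ans d run = loopB xs prev ans d run from by
          simp [loopB]]
      exact ih prev ans d run hv
    · -- nums[i] < nums[i-1]
      have hB : loopB (x :: xs) prev ans d run =
          (if (if (-1 : Int) = d then run + 1 else 1) = 4 then loopB xs x (ans + 1) (-1) 0
           else loopB xs x ans (-1) (if (-1 : Int) = d then run + 1 else 1)) := by
        simp only [loopB, if_neg (by omega : ¬ x > prev), if_pos h]
      rw [hA, hB, step_down (x - prev) ans d run hv (by omega)]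
      split_ifs <;>
        first
          | omega
          | exact ih x _ _ _ (by unfold ValidSt at hv ⊢; omega)

-- ===== VERDICT (by name: the statement is the Claim_ definition above) =====
theorem solve_spec : Claim_equal_solve := by
  intro nums _
  unfold Spec_solve
  cases nums with
  | nil => decide
  | cons h t =>
    have hk := loop_key t h 0 0 0 (Or.inl ⟨rfl, Or.inl rfl⟩)
    simpa [solve, solve_alt, shiftv, vecOf] using hk
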